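-- pv_equiv track=rewrite | github.com/khushaal-nandwani/google-kickstart | 2023/create_teams.py | binary_list
-- ===== SOURCE A (Python) =====
-- from math import log2
--
-- def binary_list(m):
-- 	# precondition
-- 	# assert m >= 0 and isinstance(m, int)
-- 	(divisor, sum_list, pow) = (m, [], 0)
-- 	while divisor != 0:
-- 		# loop invariant
-- 		assert sum(sum_list) + (divisor * 2**pow) == m
-- 		sum_list = [2**pow * (divisor % 2)] + sum_list
-- 		divisor //= 2
-- 		pow += 1
-- 	# postcondition(s)
-- 	assert all([x == 0 or log2(x) == int(log2(x)) for x in sum_list])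
-- 	assert sum(sum_list) == m
-- 	return sum_list
-- ===== SOURCE B (Python) =====
-- def binary_list(m):
--     n = m.bit_length()
--     return [((m >> k) & 1) << k for k in range(n - 1, -1, -1)]
-- ===== Notes on version B (the rewrite author's own statement) =====
-- stated objective: idiomatic
-- what changed: B replaces the while-loop that extracts the least-significant bit with %2 and //=2 and prepends to the list by a single forward comprehension over range(bit_length-1, -1, -1) that extracts each bit with shifts and masks, building the list front-to-back; m==0 falls out naturally as [].
import Mathlib
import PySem

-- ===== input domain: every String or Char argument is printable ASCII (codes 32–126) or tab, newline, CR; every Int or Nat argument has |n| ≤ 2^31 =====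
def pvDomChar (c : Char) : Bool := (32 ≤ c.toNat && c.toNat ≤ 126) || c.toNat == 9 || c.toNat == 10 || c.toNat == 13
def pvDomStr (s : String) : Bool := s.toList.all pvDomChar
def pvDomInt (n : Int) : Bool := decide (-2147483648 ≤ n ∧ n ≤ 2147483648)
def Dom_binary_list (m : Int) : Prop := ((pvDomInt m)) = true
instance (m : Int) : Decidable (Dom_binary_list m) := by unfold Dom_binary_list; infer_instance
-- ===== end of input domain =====

-- B replaces A's LSB-extraction/prepend while-loop by a forward MSB-first comprehension
-- over range(bit_length-1, -1, -1) using shifts and masks; proved equal for 0 ≤ m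
-- (Pre_ excludes negative m, on which A loops forever and returns nothing).


-- ===== PORT A =====
-- the while loop: condition is 'divisor != 0' in Python; for divisor < 0 Python never
-- terminates (excluded by Pre_), so on the admitted inputs it is exactly '0 < divisor'.
def binary_loop (divisor : Int) (sum_list : List Int) (pw : Nat) : List Int :=
  if h : 0 < divisor then
    binary_loop (PySem.Int.floordiv divisor 2) ((2 ^ pw * PySem.Int.mod divisor 2) :: sum_list) (pw + 1)
  else sum_list
termination_by divisor.toNat
decreasing_by
  simp only [PySem.Int.floordiv, Int.fdiv_eq_ediv]
  omega

def binary_list (m : Int) : List Int := binary_loop m [] 0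

-- ===== PORT B =====
-- '(m >> k) & 1) << k' with k from range(n-1, -1, -1); k ≥ 0 throughout that range,
-- so 'k.toNat' is exact for Python's shift amounts.
def binary_list_alt (m : Int) : List Int :=
  let n : Int := PySem.Int.bitLength m
  (PySem.List.pyRange (n - 1) (-1) (-1)).map
    (fun k => (PySem.Int.band (m >>> k.toNat) 1) <<< k.toNat)

-- ===== PRECONDITION & SPEC =====
-- Pre_ excludes exactly the negative m, on which A's while loop never terminates.
def Pre_binary_list (m : Int) : Prop := 0 ≤ m
instance (m : Int) : Decidable (Pre_binary_list m) := by unfold Pre_binary_list; infer_instance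
def pvWitness_binary_list : Int := (5)

def Spec_binary_list (m : Int) (out : List Int) : Prop := out = binary_list_alt m
instance (m : Int) (out : List Int) : Decidable (Spec_binary_list m out) := by unfold Spec_binary_list; infer_instance

-- ===== CLAIM (what is proved, stated in full; the proofs are below) =====
def Claim_equal_binary_list : Prop := ∀ (m : Int), Dom_binary_list m → Pre_binary_list m → Spec_binary_list m (binary_list m)

-- ===== LEMMAS AND PROOFS =====

-- proof-side value of bit k of d, in place
def pvBv (d k : Nat) : Nat := d / 2 ^ k % 2 * 2 ^ k

-- proof-side characterisation of A's loop result (without the accumulator)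
def pvW (d : Nat) (pw : Nat) : List Int :=
  if d = 0 then [] else pvW (d / 2) (pw + 1) ++ [2 ^ pw * ((d : Int) % 2)]
decreasing_by omega

theorem pvW_zero (pw : Nat) : pvW 0 pw = [] := by simp [pvW]

theorem binary_loop_eq_pvW (d : Nat) : ∀ (acc : List Int) (pw : Nat),
    binary_loop (d : Int) acc pw = pvW d pw ++ acc := by
  induction d using Nat.strong_induction_on with
  | _ d ih =>
    intro acc pw
    by_cases h : d = 0
    · subst h; rw [binary_loop.eq_def, pvW]; simp
    · rw [binary_loop.eq_def, pvW]
      have hpos : (0 : Int) < (d : Int) := by exact_mod_cast Nat.pos_of_ne_zero h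
      have hfd : PySem.Int.floordiv (d : Int) 2 = ((d / 2 : Nat) : Int) := by
        simp only [PySem.Int.floordiv, Int.fdiv_eq_ediv]; omega
      have hmd : PySem.Int.mod (d : Int) 2 = ((d : Int) % 2) := by
        simp only [PySem.Int.mod, Int.fmod_eq_emod]; omega
      rw [dif_pos hpos, hfd, hmd, ih (d / 2) (by omega)]
      simp [h]

theorem pvBv_succ (d k : Nat) : pvBv d (k + 1) = 2 * pvBv (d / 2) k := by
  unfold pvBv
  rw [pow_succ, Nat.mul_comm (2 ^ k) 2, ← Nat.div_div_eq_div_mul]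
  ring

theorem pvW_eq_map (d : Nat) : ∀ (pw : Nat),
    pvW d pw = (List.range (PySem.Int.bitLength (d : Int))).map
      (fun j => (2 : Int) ^ pw * (pvBv d (PySem.Int.bitLength (d : Int) - 1 - j) : Int)) := by
  induction d using Nat.strong_induction_on with
  | _ d ih =>
    intro pw
    by_cases h : d = 0
    · subst h; simp [pvW_zero, PySem.Int.bitLength_zero]
    · have hL : PySem.Int.bitLength (d : Int) = PySem.Int.bitLength ((d / 2 : Nat) : Int) + 1 :=
        PySem.Int.bitLength_natCast (Nat.pos_of_ne_zero h)
      rw [pvW, if_neg h, ih (d / 2) (by omega) (pw + 1), hL]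
      rw [List.range_succ, List.map_append, List.map_singleton]
      congr 1
      · apply List.map_congr_left
        intro j hj
        rw [List.mem_range] at hj
        have hk : PySem.Int.bitLength ((d / 2 : Nat) : Int) + 1 - 1 - j
            = (PySem.Int.bitLength ((d / 2 : Nat) : Int) - 1 - j) + 1 := by omega
        rw [hk, pvBv_succ]
        push_cast
        ring
      · have hb : pvBv d 0 = d % 2 := by unfold pvBv; simp
        simp only [Nat.add_sub_cancel, Nat.sub_self, hb]
        push_cast
        ring_nf

theorem alt_eq_map (d : Nat) :
    binary_list_alt (d : Int) = (List.range (PySem.Int.bitLength (d : Int))).map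
      (fun j => ((pvBv d (PySem.Int.bitLength (d : Int) - 1 - j) : Nat) : Int)) := by
  unfold binary_list_alt
  simp only [PySem.List.pyRange_neg_one]
  set L : Nat := PySem.Int.bitLength (d : Int) with hLdef
  have hcount : ((L : Int) - 1 - -1).toNat = L := by omega
  rw [hcount, List.map_map]
  apply List.map_congr_left
  intro j hj
  rw [List.mem_range] at hj
  have hk : ((L : Int) - 1 - j).toNat = L - 1 - j := by omega
  simp only [Function.comp_apply, hk]
  -- reduce the Int shift/mask expression to Nat arithmetic
  rw [Int.shiftRight_natCast]
  have hband : ∀ x : Nat, PySem.Int.band ((x : Nat) : Int) 1 = ((x % 2 : Nat) : Int) := by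
    intro x; simp [PySem.Int.band]
  rw [hband, Int.shiftLeft_natCast]
  congr 1
  unfold pvBv
  rw [Nat.shiftRight_eq_div_pow, Nat.shiftLeft_eq]

-- ===== VERDICT (by name: the statement is the Claim_ definition above) =====
theorem binary_list_spec : Claim_equal_binary_list := by
  intro m _ hpre
  have hm : (0 : Int) ≤ m := hpre
  unfold Spec_binary_list binary_list
  obtain ⟨d, rfl⟩ : ∃ d : Nat, m = (d : Int) := ⟨m.toNat, by omega⟩
  rw [binary_loop_eq_pvW, List.append_nil, pvW_eq_map, alt_eq_map]
  apply List.map_congr_left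
  intro j _
  push_cast
  ring
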